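-- pv_equiv track=rewrite | github.com/EugeneJenkins/pyschool | Tuples/7.py | removeCommonElements
-- ===== SOURCE A (Python) =====
-- def removeCommonElements(t1, t2):
-- 	result = set(list(t1) + list(t2))
-- 	common = []
-- 	for i in t1:
-- 		for j in t2:
-- 			if i == j:
-- 				common.append(i)
-- 	for element in common:
-- 		if element in result:
-- 			result.remove(element)
-- 		else: pass
-- 	return tuple(sorted(result))
-- ===== SOURCE B (Python) =====
-- def removeCommonElements(t1, t2):
--     # Flag dict: bit 1 = occurs in t1, bit 2 = occurs in t2; keep flags != 3.
--     seen = {}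
--     for x in t1:
--         seen[x] = seen.get(x, 0) | 1
--     for x in t2:
--         seen[x] = seen.get(x, 0) | 2
--     return tuple(sorted(k for k, v in seen.items() if v != 3))
-- ===== Notes on version B (the rewrite author's own statement) =====
-- stated objective: faster
-- what changed: Replaces the quadratic nested common-finding loop and the set-removal pass with two linear dict passes that OR membership flags (1=t1, 2=t2) into one dict, then keeps keys whose flag is not 3.
import Mathlib
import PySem

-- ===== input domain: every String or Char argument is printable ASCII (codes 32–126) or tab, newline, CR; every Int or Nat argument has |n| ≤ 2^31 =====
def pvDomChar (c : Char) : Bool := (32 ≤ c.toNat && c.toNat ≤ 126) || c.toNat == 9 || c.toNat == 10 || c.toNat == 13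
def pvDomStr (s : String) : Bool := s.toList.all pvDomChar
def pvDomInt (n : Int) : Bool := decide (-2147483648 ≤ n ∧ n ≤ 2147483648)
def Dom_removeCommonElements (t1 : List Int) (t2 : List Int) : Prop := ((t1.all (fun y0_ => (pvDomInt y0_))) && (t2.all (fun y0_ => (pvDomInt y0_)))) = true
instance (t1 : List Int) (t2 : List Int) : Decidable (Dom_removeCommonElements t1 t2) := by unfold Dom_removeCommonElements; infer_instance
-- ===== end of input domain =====

-- B replaces A's quadratic nested common-element scan and set-removal pass with two
-- linear dict passes OR-ing membership flags, then filters flags ≠ 3 (asymptotically faster).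

-- ===== PORT A =====
def removeCommonElements (t1 : List Int) (t2 : List Int) : List Int :=
  let result := PySem.Set.ofList (t1 ++ t2)
  let common := t1.foldl (fun acc i =>
      t2.foldl (fun acc j => if i == j then acc ++ [i] else acc) acc) ([] : List Int)
  let result := common.foldl (fun r e =>
      if PySem.Set.contains r e then
        match PySem.Set.remove? r e with
        | some r' => r'
        | none => r       -- unreachable: guarded by the contains test
      else r) result
  PySem.List.sorted result (fun x => x) false

-- ===== PORT B =====
def removeCommonElements_alt (t1 : List Int) (t2 : List Int) : List Int :=
  let seen : PySem.Dict Int Int :=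
    t1.foldl (fun d x => d.insert x (Int.lor (d.getD x 0) 1)) PySem.Dict.empty
  let seen := t2.foldl (fun d x => d.insert x (Int.lor (d.getD x 0) 2)) seen
  PySem.List.sorted ((seen.items.filter (fun kv => kv.2 != 3)).map (fun kv => kv.1))
    (fun x => x) false

-- ===== PRECONDITION & SPEC =====
def Spec_removeCommonElements (t1 : List Int) (t2 : List Int) (out : List Int) : Prop := out = removeCommonElements_alt t1 t2
instance (t1 : List Int) (t2 : List Int) (out : List Int) : Decidable (Spec_removeCommonElements t1 t2 out) := by unfold Spec_removeCommonElements; infer_instance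

-- ===== CLAIM (what is proved, stated in full; the proofs are below) =====
def Claim_equal_removeCommonElements : Prop := ∀ (t1 : List Int) (t2 : List Int), Dom_removeCommonElements t1 t2 → Spec_removeCommonElements t1 t2 (removeCommonElements t1 t2)

-- ===== LEMMAS AND PROOFS =====

-- membership in A's inner common-collecting fold
lemma mem_inner_fold (i x : Int) (t2 : List Int) (acc : List Int) :
    x ∈ t2.foldl (fun acc j => if i == j then acc ++ [i] else acc) acc ↔
      x ∈ acc ∨ (x = i ∧ i ∈ t2) := by
  induction t2 generalizing acc with
  | nil => simp
  | cons j t ih =>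
    simp only [List.foldl_cons, ih]
    by_cases h : i = j
    · subst h; simp; tauto
    · simp only [beq_iff_eq, h, List.mem_cons]
      constructor
      · rintro (ha | ⟨rfl, hm⟩)
        · exact Or.inl ha
        · exact Or.inr ⟨rfl, Or.inr hm⟩
      · rintro (ha | ⟨rfl, (hj | hm)⟩)
        · exact Or.inl ha
        · exact hj.elim
        · exact Or.inr ⟨rfl, hm⟩

lemma mem_common (x : Int) (t1 t2 : List Int) (acc : List Int) :
    x ∈ t1.foldl (fun acc i =>
        t2.foldl (fun acc j => if i == j then acc ++ [i] else acc) acc) acc ↔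
      x ∈ acc ∨ (x ∈ t1 ∧ x ∈ t2) := by
  induction t1 generalizing acc with
  | nil => simp
  | cons i t ih =>
    simp only [List.foldl_cons, ih, mem_inner_fold, List.mem_cons]
    constructor
    · rintro ((ha | ⟨rfl, hm⟩) | ⟨h1, h2⟩)
      · exact Or.inl ha
      · exact Or.inr ⟨Or.inl rfl, hm⟩
      · exact Or.inr ⟨Or.inr h1, h2⟩
    · rintro (ha | ⟨(rfl | h1), h2⟩)
      · exact Or.inl (Or.inl ha)
      · exact Or.inl (Or.inr ⟨rfl, h2⟩)
      · exact Or.inr ⟨h1, h2⟩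

-- A's removal loop: membership and Nodup of the resulting set
lemma removal_mem (common : List Int) (r : List Int) (x : Int) :
    x ∈ common.foldl (fun r e =>
      if PySem.Set.contains r e then
        match PySem.Set.remove? r e with
        | some r' => r'
        | none => r
      else r) r ↔ x ∈ r ∧ x ∉ common := by
  induction common generalizing r with
  | nil => simp
  | cons e t ih =>
    simp only [List.foldl_cons, ih, List.mem_cons]
    by_cases h : e ∈ r
    · rw [if_pos ((PySem.Set.contains_iff r e).2 h), PySem.Set.remove?_of_mem h]
      simp only [PySem.Set.mem_discard]
      constructor
      · rintro ⟨⟨hx, hne⟩, hnt⟩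
        exact ⟨hx, by rintro (rfl | hm); exact hne rfl; exact hnt hm⟩
      · rintro ⟨hx, hn⟩
        exact ⟨⟨hx, fun hEq => hn (Or.inl hEq)⟩, fun hm => hn (Or.inr hm)⟩
    · have hc : PySem.Set.contains r e = false := by
        rcases Bool.eq_false_or_eq_true (PySem.Set.contains r e) with h' | h'
        · exact absurd ((PySem.Set.contains_iff r e).1 h') h
        · exact h'
      rw [hc]
      simp only [Bool.false_eq_true, if_false]
      constructor
      · rintro ⟨hx, hnt⟩
        refine ⟨hx, ?_⟩
        rintro (rfl | hm)
        · exact h hx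
        · exact hnt hm
      · rintro ⟨hx, hn⟩
        exact ⟨hx, fun hm => hn (Or.inr hm)⟩

lemma removal_nodup (common : List Int) (r : List Int) (hr : r.Nodup) :
    (common.foldl (fun r e =>
      if PySem.Set.contains r e then
        match PySem.Set.remove? r e with
        | some r' => r'
        | none => r
      else r) r).Nodup := by
  induction common generalizing r with
  | nil => exact hr
  | cons e t ih =>
    simp only [List.foldl_cons]
    apply ih
    by_cases h : e ∈ r
    · rw [if_pos ((PySem.Set.contains_iff r e).2 h), PySem.Set.remove?_of_mem h]
      exact PySem.Set.nodup_discard r e hr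
    · have hc : PySem.Set.contains r e = false := by
        rcases Bool.eq_false_or_eq_true (PySem.Set.contains r e) with h' | h'
        · exact absurd ((PySem.Set.contains_iff r e).1 h') h
        · exact h'
      rw [hc]
      simpa using hr

-- B's first fold: flag becomes 1 on members of l, untouched elsewhere
lemma flag1_getD (v : Int) (l : List Int) (d : PySem.Dict Int Int)
    (hinv : ∀ w, d.getD w 0 = 0 ∨ d.getD w 0 = 1) :
    (l.foldl (fun d x => d.insert x (Int.lor (d.getD x 0) 1)) d).getD v 0 =
      if v ∈ l then 1 else d.getD v 0 := by
  induction l generalizing d with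
  | nil => simp
  | cons x t ih =>
    have hx1 : Int.lor (d.getD x 0) 1 = 1 := by
      rcases hinv x with h | h <;> rw [h] <;> decide
    have hinv' : ∀ w, (d.insert x (Int.lor (d.getD x 0) 1)).getD w 0 = 0 ∨
        (d.insert x (Int.lor (d.getD x 0) 1)).getD w 0 = 1 := by
      intro w
      rw [PySem.Dict.getD_insert]
      split
      · right; exact hx1
      · exact hinv w
    rw [List.foldl_cons, ih _ hinv', PySem.Dict.getD_insert]
    by_cases hvt : v ∈ t <;> by_cases hvx : v = x <;> simp [hvt, hvx, hx1]

-- B's second fold: ORs 2 into the flag of every member of l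
lemma flag2_getD (v : Int) (l : List Int) (d : PySem.Dict Int Int)
    (hinv : ∀ w, d.getD w 0 = 0 ∨ d.getD w 0 = 1 ∨ d.getD w 0 = 2 ∨ d.getD w 0 = 3) :
    (l.foldl (fun d x => d.insert x (Int.lor (d.getD x 0) 2)) d).getD v 0 =
      if v ∈ l then Int.lor (d.getD v 0) 2 else d.getD v 0 := by
  induction l generalizing d with
  | nil => simp
  | cons x t ih =>
    have hidem : Int.lor (Int.lor (d.getD x 0) 2) 2 = Int.lor (d.getD x 0) 2 := by
      rcases hinv x with h | h | h | h <;> rw [h] <;> decide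
    have hinv' : ∀ w, (d.insert x (Int.lor (d.getD x 0) 2)).getD w 0 = 0 ∨
        (d.insert x (Int.lor (d.getD x 0) 2)).getD w 0 = 1 ∨
        (d.insert x (Int.lor (d.getD x 0) 2)).getD w 0 = 2 ∨
        (d.insert x (Int.lor (d.getD x 0) 2)).getD w 0 = 3 := by
      intro w
      rw [PySem.Dict.getD_insert]
      split
      · rcases hinv x with h | h | h | h <;> rw [h] <;> decide
      · exact hinv w
    rw [List.foldl_cons, ih _ hinv', PySem.Dict.getD_insert]
    by_cases hvx : v = x
    · subst hvx
      by_cases hvt : v ∈ t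
      · simp [hvt, hidem]
      · simp [hvt]
    · by_cases hvt : v ∈ t <;> simp [hvt, hvx]

-- the final flag of v encodes membership in t1 and t2
lemma seen2_getD (t1 t2 : List Int) (v : Int) :
    (t2.foldl (fun d x => d.insert x (Int.lor (d.getD x 0) 2))
        (t1.foldl (fun d x => d.insert x (Int.lor (d.getD x 0) 1))
          PySem.Dict.empty)).getD v 0 =
      Int.lor (if v ∈ t1 then 1 else 0) (if v ∈ t2 then 2 else 0) := by
  have h1 : ∀ w, (t1.foldl (fun d x => d.insert x (Int.lor (d.getD x 0) 1))
      PySem.Dict.empty).getD w 0 = if w ∈ t1 then 1 else 0 := by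
    intro w
    rw [flag1_getD w t1 PySem.Dict.empty (by intro u; left; simp)]
    simp [PySem.Dict.getD_empty]
  rw [flag2_getD v t2 _ (by intro w; rw [h1 w]; split <;> simp), h1 v]
  by_cases h2 : v ∈ t2 <;> by_cases hm1 : v ∈ t1 <;> simp [h2, hm1] <;> decide

lemma seen2_keys (t1 t2 : List Int) :
    (t2.foldl (fun d x => d.insert x (Int.lor (d.getD x 0) 2))
        (t1.foldl (fun d x => d.insert x (Int.lor (d.getD x 0) 1))
          PySem.Dict.empty)).keys = PySem.Set.ofList (t1 ++ t2) := by
  rw [PySem.Dict.keys_foldl_insert, PySem.Dict.keys_foldl_insert]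
  rw [PySem.Dict.keys_empty, PySem.Set.update_nil_left, PySem.Set.ofList_append]

lemma seen2_keys_nodup (t1 t2 : List Int) :
    (t2.foldl (fun d x => d.insert x (Int.lor (d.getD x 0) 2))
        (t1.foldl (fun d x => d.insert x (Int.lor (d.getD x 0) 1))
          PySem.Dict.empty)).keys.Nodup := by
  rw [seen2_keys]; exact PySem.Set.nodup_ofList _

-- ===== VERDICT (by name: the statement is the Claim_ definition above) =====
theorem removeCommonElements_spec : Claim_equal_removeCommonElements := by
  intro t1 t2 _
  unfold Spec_removeCommonElements removeCommonElements removeCommonElements_alt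
  simp only []
  set seen2 := t2.foldl (fun d x => d.insert x (Int.lor (d.getD x 0) 2))
      (t1.foldl (fun d x => d.insert x (Int.lor (d.getD x 0) 1))
        PySem.Dict.empty) with hseen2
  have hnd : seen2.keys.Nodup := seen2_keys_nodup t1 t2
  have hitems : seen2.items = seen2.keys.map (fun k => (k, seen2.getD k 0)) :=
    PySem.Dict.items_eq_map_keys seen2 hnd 0
  have hB : (seen2.items.filter (fun kv => kv.2 != 3)).map (fun kv => kv.1) =
      seen2.keys.filter (fun k => seen2.getD k 0 != 3) := by
    rw [hitems, List.filter_map, List.map_map]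
    simp [Function.comp_def]
  rw [hB]
  apply PySem.List.sorted_eq_sorted_of_perm
  · exact fun a b h => h
  · have hndA := removal_nodup
      (t1.foldl (fun acc i =>
        t2.foldl (fun acc j => if i == j then acc ++ [i] else acc) acc) [])
      (PySem.Set.ofList (t1 ++ t2)) (PySem.Set.nodup_ofList _)
    have hndB : (seen2.keys.filter (fun k => seen2.getD k 0 != 3)).Nodup :=
      hnd.filter _
    rw [List.perm_ext_iff_of_nodup hndA hndB]
    intro a
    rw [removal_mem, List.mem_filter]
    rw [mem_common, seen2_keys]
    simp only [PySem.Set.mem_ofList, List.mem_append, bne_iff_ne, ne_eq]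
    by_cases h1 : a ∈ t1 <;> by_cases h2 : a ∈ t2 <;>
      simp [h1, h2, hseen2, seen2_getD] <;> decide
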